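-- pv_equiv track=rewrite | github.com/zenuie/codewars | python/Repetitive_Sequence_Easy_Version.py | find
-- ===== SOURCE A (Python) =====
-- def find(n):
--     arr = [0, 1, 2, 2]
--     if n <= 3:
--         return arr[n]
--     else:
--         length = 4  # actual length of the array
--         arr_sum = 5  # the total possible index with the current array
--         for num in range(3, n + 1):
--             arr_sum += arr[num] * num
--             if arr_sum >= n:
--                 diff = (arr_sum - n) // num
--                 max_val = length - 1 + arr[num]
--                 return max_val - diff
--             length += arr[num]
--             if length < 100_000:
--                 arr.extend([num] * arr[num])
-- ===== SOURCE B (Python) =====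
-- def find(n):
--     g = [0, 1, 2, 2]
--     if n <= 3:
--         return g[n]
--     total = 3  # 3 + sum of run lengths g[3..v] once v's run is counted
--     for v in range(3, n + 1):
--         total += g[v]
--         if total >= n:
--             return v
--         g.append(1 + g[v + 1 - g[g[v]]])
-- ===== Notes on version B (the rewrite author's own statement) =====
-- stated objective: simpler
-- what changed: A run-length-decodes the self-describing sequence into a capped array and jumps to the answer with per-run-length block sums and a floor division; B instead builds the run-length table directly via the Golomb recurrence g[v+1] = 1 + g[v+1-g[g[v]]] and returns the first value v whose cumulative run length reaches n.
import Mathlib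
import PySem

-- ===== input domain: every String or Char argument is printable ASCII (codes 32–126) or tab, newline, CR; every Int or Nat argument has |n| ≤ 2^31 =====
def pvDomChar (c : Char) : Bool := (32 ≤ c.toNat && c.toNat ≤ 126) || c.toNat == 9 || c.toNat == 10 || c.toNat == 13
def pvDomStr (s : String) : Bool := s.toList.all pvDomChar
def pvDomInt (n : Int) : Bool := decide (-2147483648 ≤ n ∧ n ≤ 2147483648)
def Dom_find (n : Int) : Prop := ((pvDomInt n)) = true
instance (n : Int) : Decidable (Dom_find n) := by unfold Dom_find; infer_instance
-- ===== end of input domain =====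

-- B replaces A's run-length decoding plus per-block sum/division arithmetic with the direct
-- Golomb recurrence and a plain cumulative scan over the values (objective: simpler).

-- ===== PORT A =====
-- hand-ported (exact) Python list indexing on an Array backing store:
-- negative index counts from the end, none = IndexError (same as PySem.List.pyGet? on the list)
def pyListGet? (a : Array Int) (i : Int) : Option Int :=
  let j := if i < 0 then i + a.size else i
  if h : 0 ≤ j ∧ j.toNat < a.size then some (a[j.toNat]'h.2) else none

-- the for-loop of A over range(3, n+1), iterated lazily as in Python: fuel = remaining
-- iterations, num = loop variable; state (arr, length, arr_sum); none = fell through / IndexError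
def findLoopA (n : Int) : ℕ → Int → Array Int → Int → Int → Option Int
  | 0, _, _, _, _ => none
  | f+1, num, arr, length, arr_sum =>
    match pyListGet? arr num with
    | none => none
    | some a =>
      let arr_sum' := arr_sum + a * num
      if n ≤ arr_sum' then
        some (length - 1 + a - PySem.Int.floordiv (arr_sum' - n) num)
      else
        let length' := length + a
        findLoopA n f (num + 1)
          (if length' < 100000 then (List.replicate a.toNat num).foldl Array.push arr else arr)
          length' arr_sum'

def find (n : Int) : Int :=
  let arr : List Int := [0, 1, 2, 2]
  if n ≤ 3 then (PySem.List.pyGet? arr n).getD 0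
  else (findLoopA n (n - 2).toNat 3 arr.toArray 4 5).getD 0

-- ===== PORT B =====
-- the for-loop of B over range(3, n+1), iterated lazily: fuel = remaining iterations,
-- v = loop variable; state (g, total); none = fell through / IndexError
def findLoopB (n : Int) : ℕ → Int → Array Int → Int → Option Int
  | 0, _, _, _ => none
  | f+1, v, g, total =>
    match pyListGet? g v with
    | none => none
    | some gv =>
      let total' := total + gv
      if n ≤ total' then some v
      else
        match pyListGet? g gv with
        | none => none
        | some ggv =>
          match pyListGet? g (v + 1 - ggv) with
          | none => none
          | some x => findLoopB n f (v + 1) (g.push (1 + x)) total'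

def find_alt (n : Int) : Int :=
  let g : List Int := [0, 1, 2, 2]
  if n ≤ 3 then (PySem.List.pyGet? g n).getD 0
  else (findLoopB n (n - 2).toNat 3 g.toArray 3).getD 0

-- ===== PRECONDITION & SPEC =====
-- Pre_ excludes only n ≤ -5, where the Python A (and B alike) raises IndexError on arr[n].
def Pre_find (n : Int) : Prop := -4 ≤ n
instance (n : Int) : Decidable (Pre_find n) := by unfold Pre_find; infer_instance
def pvWitness_find : Int := 10

def Spec_find (n : Int) (out : Int) : Prop := out = find_alt n
instance (n : Int) (out : Int) : Decidable (Spec_find n out) := by unfold Spec_find; infer_instance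

-- ===== CLAIM (what is proved, stated in full; the proofs are below) =====
def Claim_equal_find : Prop := ∀ (n : Int), Dom_find n → Pre_find n → Spec_find n (find n)

-- ===== LEMMAS AND PROOFS =====

-- fuelled Golomb recurrence
def Gf : ℕ → ℕ → ℕ
  | _, 0 => 0
  | _, 1 => 1
  | _, 2 => 2
  | _, 3 => 2
  | 0, _+4 => 0
  | f+1, k+4 => 1 + Gf f ((k+4) - Gf f (Gf f (k+3)))

def G (k : ℕ) : ℕ := Gf k k

theorem Gf_spec : ∀ k : ℕ, (∀ f, k ≤ f → Gf f k = G k) ∧ G k ≤ k ∧ (1 ≤ k → 1 ≤ G k) := by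
  intro k
  induction k using Nat.strong_induction_on with
  | _ k ih =>
    match k with
    | 0 => exact ⟨fun f _ => by cases f <;> rfl, by decide, by decide⟩
    | 1 => exact ⟨fun f _ => by cases f <;> rfl, by decide, by decide⟩
    | 2 => exact ⟨fun f _ => by cases f <;> rfl, by decide, by decide⟩
    | 3 => exact ⟨fun f _ => by cases f <;> rfl, by decide, by decide⟩
    | j+4 =>
      have h3 := ih (j+3) (by omega)
      have hv1 : 1 ≤ G (j+3) := h3.2.2 (by omega)
      have hv2 : G (j+3) ≤ j+3 := h3.2.1
      have hGv := ih (G (j+3)) (by omega)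
      have hw1 : 1 ≤ G (G (j+3)) := hGv.2.2 hv1
      have hw2 : G (G (j+3)) ≤ G (j+3) := hGv.2.1
      have harg := ih (j+4 - G (G (j+3))) (by omega)
      have key : ∀ f, j+4 ≤ f → Gf f (j+4) = 1 + G (j+4 - G (G (j+3))) := by
        intro f hf
        match f, hf with
        | a+1, hf =>
          show 1 + Gf a ((j+4) - Gf a (Gf a (j+3))) = _
          rw [h3.1 a (by omega), hGv.1 a (by omega), harg.1 a (by omega)]
      have hGk : G (j+4) = 1 + G (j+4 - G (G (j+3))) := key (j+4) le_rfl
      refine ⟨fun f hf => by rw [key f hf, hGk], ?_, ?_⟩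
      · rw [hGk]; have := harg.2.1; omega
      · intro _; rw [hGk]; omega

theorem G_rec (k : ℕ) : G (k+4) = 1 + G ((k+4) - G (G (k+3))) := by
  have h3 := Gf_spec (k+3)
  have hGv := Gf_spec (G (k+3))
  have harg := Gf_spec (k+4 - G (G (k+3)))
  show Gf (k+4) (k+4) = _
  show 1 + Gf (k+3) ((k+4) - Gf (k+3) (Gf (k+3) (k+3))) = _
  rw [h3.1 (k+3) le_rfl, hGv.1 (k+3) h3.2.1, harg.1 (k+3) (by have := hGv.2.2 (h3.2.2 (by omega)); omega)]

theorem G_le (k : ℕ) : G k ≤ k := (Gf_spec k).2.1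
theorem G_pos {k : ℕ} (h : 1 ≤ k) : 1 ≤ G k := (Gf_spec k).2.2 h

def Tsum : ℕ → ℕ
  | 0 => 0
  | v+1 => Tsum v + G (v+1)

theorem Tsum_mono {a b : ℕ} (h : a ≤ b) : Tsum a ≤ Tsum b := by
  induction b with
  | zero => have : a = 0 := by omega
            simp [this]
  | succ b ih =>
    rcases Nat.lt_or_ge a (b+1) with h' | h'
    · have := ih (by omega); show _ ≤ Tsum b + G (b+1); omega
    · have : a = b+1 := by omega
      simp [this]

-- helper: uniqueness of the interval, given the interval property at k
theorem G_val_aux {k v : ℕ} (hk : 1 ≤ k) (hv : 1 ≤ v)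
    (hint : Tsum (G k - 1) < k ∧ k ≤ Tsum (G k))
    (h1 : Tsum (v-1) < k) (h2 : k ≤ Tsum v) : G k = v := by
  have hGk1 : 1 ≤ G k := G_pos hk
  by_contra hne
  rcases Nat.lt_or_ge (G k) v with h | h
  · have : Tsum (G k) ≤ Tsum (v-1) := Tsum_mono (by omega)
    omega
  · have : Tsum v ≤ Tsum (G k - 1) := Tsum_mono (by omega)
    omega

-- main joint induction: interval characterisation and unit upper steps
theorem G_main : ∀ k : ℕ, (1 ≤ k → Tsum (G k - 1) < k ∧ k ≤ Tsum (G k)) ∧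
    (2 ≤ k → G k ≤ G (k-1) + 1) := by
  intro k
  induction k using Nat.strong_induction_on with
  | _ k ih =>
    match k with
    | 0 => exact ⟨by omega, by omega⟩
    | 1 => refine ⟨fun _ => ?_, by omega⟩; decide
    | 2 => refine ⟨fun _ => ?_, fun _ => ?_⟩ <;> decide
    | 3 => refine ⟨fun _ => ?_, fun _ => ?_⟩ <;> decide
    | 4 => refine ⟨fun _ => ?_, fun _ => ?_⟩ <;> decide
    | k+4+1 =>
      -- general step: k' = k+5 = (k+4)+1, predecessor p = k+4 ≥ 4
      set p := k+4 with hp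
      have ihp := (ih p (by omega)).1 (by omega)
      set v := G p with hv
      have hv2 : 2 ≤ v := by
        by_contra h
        have h1 : v ≤ 1 := by omega
        have : Tsum v ≤ Tsum 1 := Tsum_mono h1
        have : Tsum 1 = 1 := by decide
        omega
      have hvle : v ≤ p := G_le p
      have hstep : G v ≤ G (v-1) + 1 := (ih v (by omega)).2 hv2
      have hGvpos : 1 ≤ G v := G_pos (by omega)
      have hGvle : G v ≤ v := G_le v
      have hTv : Tsum v = Tsum (v-1) + G v := by
        have : v = (v-1)+1 := by omega
        rw [this]; rfl
      have hTv1 : Tsum (v-1) = Tsum (v-2) + G (v-1) := by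
        have : v-1 = (v-2)+1 := by omega
        rw [this]; rfl
      -- the recurrence at p+1 = k+5
      have hrec : G (p+1) = 1 + G (p+1 - G v) := by
        have := G_rec (k+1)
        have e1 : k+1+4 = p+1 := by omega
        have e2 : k+1+3 = p := by omega
        rw [e1, e2] at this
        exact this
      rcases Nat.lt_or_ge p (Tsum v) with hcase | hcase
      · -- k' stays inside value v's run
        have harg1 : Tsum (v-2) < p+1 - G v := by omega
        have harg2 : p+1 - G v ≤ Tsum (v-1) := by omega
        have hargk : p+1 - G v ≤ p := by omega
        have hargpos : 1 ≤ p+1 - G v := by omega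
        have hGarg : G (p+1 - G v) = v - 1 := by
          apply G_val_aux hargpos (by omega) ((ih _ (by omega)).1 hargpos)
          · have : v - 1 - 1 = v - 2 := by omega
            rw [this]; exact harg1
          · exact harg2
        have hGk' : G (p+1) = v := by rw [hrec, hGarg]; omega
        constructor
        · intro _
          rw [hGk']
          exact ⟨by omega, by omega⟩
        · intro _
          have : p + 1 - 1 = p := by omega
          rw [this, hGk']
          omega
      · -- p = Tsum v exactly: k' starts the run of v+1
        have hpeq : p = Tsum v := by omega
        have harg : p+1 - G v = Tsum (v-1) + 1 := by omega
        have hGarg : G (p+1 - G v) = v := by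
          rw [harg]
          apply G_val_aux (by omega) (by omega) ((ih _ (by omega)).1 (by omega))
          · omega
          · omega
        have hGk' : G (p+1) = v + 1 := by rw [hrec, hGarg]; omega
        have hTv1' : Tsum (v+1) = Tsum v + G (v+1) := rfl
        have : 1 ≤ G (v+1) := G_pos (by omega)
        constructor
        · intro _
          rw [hGk']
          have : v + 1 - 1 = v := by omega
          rw [this]
          omega
        · intro _
          have : p + 1 - 1 = p := by omega
          rw [this, hGk']

theorem G_interval {k : ℕ} (h : 1 ≤ k) : Tsum (G k - 1) < k ∧ k ≤ Tsum (G k) :=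
  (G_main k).1 h

theorem G_val {k v : ℕ} (hv : 1 ≤ v) (h1 : Tsum (v-1) < k) (h2 : k ≤ Tsum v) : G k = v := by
  have hk : 1 ≤ k := by omega
  exact G_val_aux hk hv (G_interval hk) h1 h2

theorem G_mono {j k : ℕ} (h : j ≤ k) : G j ≤ G k := by
  match j with
  | 0 => show 0 ≤ G k; omega
  | j+1 =>
    by_contra hlt
    have hij := G_interval (k := j+1) (by omega)
    have hik := G_interval (k := k) (by omega)
    have h1 : Tsum (G k) ≤ Tsum (G (j+1) - 1) := Tsum_mono (by omega)
    omega

theorem Tsum_succ (v : ℕ) : Tsum (v+1) = Tsum v + G (v+1) := rfl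

-- Tsum m ≥ m+1 for m ≥ 2
theorem Tsum_lb {m : ℕ} (h : 2 ≤ m) : m + 1 ≤ Tsum m := by
  induction m with
  | zero => omega
  | succ m ih =>
    rcases Nat.lt_or_ge m 2 with h' | h'
    · interval_cases m
      · omega
      · decide
    · have h1 := ih h'
      have h2 : 1 ≤ G (m+1) := G_pos (by omega)
      rw [Tsum_succ]; omega

-- G m ≥ 5 for m ≥ 9
theorem G_ge5 {m : ℕ} (h : 9 ≤ m) : 5 ≤ G m := by
  have : G 9 ≤ G m := G_mono h
  have : G 9 = 5 := by decide
  omega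

-- Tsum m ≥ 5m - 17 for m ≥ 8
theorem Tsum_lb5 {m : ℕ} (h : 8 ≤ m) : 5 * m ≤ Tsum m + 17 := by
  induction m with
  | zero => omega
  | succ m ih =>
    rcases Nat.lt_or_ge m 8 with h' | h'
    · have : m = 7 := by omega
      subst this; decide
    · have h1 := ih h'
      have h2 : 5 ≤ G (m+1) := G_ge5 (by omega)
      rw [Tsum_succ]; omega

-- upper bound for G on the range the cap argument needs
theorem G_ub {k : ℕ} (h : k ≤ 100001) : G k ≤ 20004 := by
  rcases Nat.lt_or_ge (G k) 9 with h' | h'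
  · omega
  · have hk1 : 1 ≤ k := by
      by_contra h0
      have : k = 0 := by omega
      rw [this] at h'
      have : G 0 = 0 := rfl
      omega
    have hint := (G_interval hk1).1
    have h8 : 8 ≤ G k - 1 := by omega
    have := Tsum_lb5 h8
    omega

-- interval sum: if G is constantly v on (a, a+b], then Tsum (a+b) = Tsum a + b * v
theorem Tsum_const_block (v : ℕ) : ∀ b a, (∀ i, a < i → i ≤ a + b → G i = v) →
    Tsum (a + b) = Tsum a + b * v := by
  intro b
  induction b with
  | zero => intro a _; simp
  | succ b ih =>
    intro a hall
    have h1 : a + (b+1) = (a + b) + 1 := by omega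
    rw [h1, Tsum_succ, ih a (fun i h1 h2 => hall i h1 (by omega)), hall (a+b+1) (by omega) (by omega)]
    ring

-- arr_sum of A: SA m = 5 + Σ_{k=3}^m k·G k
def SA : ℕ → ℕ
  | 0 => 5
  | 1 => 5
  | 2 => 5
  | m+3 => SA (m+2) + G (m+3) * (m+3)

theorem SA_succ {m : ℕ} (h : 2 ≤ m) : SA (m+1) = SA m + G (m+1) * (m+1) := by
  match m, h with
  | m+2, _ => rfl

theorem SA_mono {a b : ℕ} (h : a ≤ b) : SA a ≤ SA b := by
  induction b with
  | zero => have : a = 0 := by omega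
            simp [this]
  | succ b ih =>
    rcases Nat.lt_or_ge a (b+1) with h' | h'
    · have h1 := ih (by omega)
      rcases Nat.lt_or_ge b 2 with h2 | h2
      · interval_cases b <;> interval_cases a <;> simp [SA]
      · rw [SA_succ h2]; omega
    · have : a = b+1 := by omega
      simp [this]

-- SA m = Tsum (Tsum m) for m ≥ 2
theorem SA_eq {m : ℕ} (h : 2 ≤ m) : SA m = Tsum (Tsum m) := by
  induction m with
  | zero => omega
  | succ m ih =>
    rcases Nat.lt_or_ge m 2 with h' | h'
    · have : m = 1 := by omega
      subst this; decide
    · have hyp : ∀ i, Tsum m < i → i ≤ Tsum m + G (m+1) → G i = m+1 := by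
        intro i h1 h2
        exact G_val (by omega) (by have e : m+1-1 = m := by omega
                                   rw [e]; omega) (by rw [Tsum_succ]; omega)
      have hb := Tsum_const_block (m+1) (G (m+1)) (Tsum m) hyp
      rw [SA_succ h', ih h', Tsum_succ, hb]

-- SA m ≥ m(m+1) - 1 for m ≥ 3
theorem SA_lb {m : ℕ} (h : 3 ≤ m) : m * (m+1) ≤ SA m + 1 := by
  induction m with
  | zero => omega
  | succ m ih =>
    rcases Nat.lt_or_ge m 3 with h' | h'
    · have : m = 2 := by omega
      subst this; decide
    · have h1 := ih h'
      have h2 : 2 ≤ G (m+1) := by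
        have : G 2 ≤ G (m+1) := G_mono (by omega)
        have : G 2 = 2 := by decide
        omega
      rw [SA_succ (by omega)]
      nlinarith

-- descending chain inside a block: for Tsum(m-1) ≤ M - k, Tsum (M-k) + k*m = Tsum M, M = Tsum m
theorem Tsum_block_chain {m : ℕ} (hm : 3 ≤ m) :
    ∀ k, k ≤ Tsum m - Tsum (m-1) → Tsum (Tsum m - k) + k * m = Tsum (Tsum m) := by
  intro k
  induction k with
  | zero => simp
  | succ k ih =>
    intro hk
    have hTm : Tsum m = Tsum (m-1) + G m := by
      have : m = (m-1)+1 := by omega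
      rw [this]; rfl
    have hlow : Tsum (m-1) < Tsum m - k := by omega
    have hpos : 1 ≤ Tsum m - k := by
      have : 3 ≤ Tsum (m-1) := by
        have := Tsum_lb (m := m-1) (by omega)
        omega
      omega
    have hGi : G (Tsum m - k) = m := by
      apply G_val (by omega) (by omega) (by omega)
    have hstep : Tsum (Tsum m - k) = Tsum (Tsum m - (k+1)) + m := by
      have e : Tsum m - k = (Tsum m - (k+1)) + 1 := by omega
      rw [e, Tsum_succ, ← e, hGi]
    have := ih (by omega)
    have e2 : (k+1) * m = k*m + m := by ring
    omega

-- existence witnesses for the two exit indices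
theorem m0_ex (N : ℕ) : ∃ m, 3 ≤ m ∧ N ≤ SA m :=
  ⟨N+3, by omega, by have := SA_lb (m := N+3) (by omega); nlinarith⟩

theorem vstar_ex (N : ℕ) : ∃ v, 3 ≤ v ∧ N ≤ Tsum v :=
  ⟨N+3, by omega, by have := Tsum_lb (m := N+3) (by omega); omega⟩

def m0 (N : ℕ) : ℕ := Nat.find (m0_ex N)
def vstar (N : ℕ) : ℕ := Nat.find (vstar_ex N)

theorem m0_spec (N : ℕ) : 3 ≤ m0 N ∧ N ≤ SA (m0 N) := Nat.find_spec (m0_ex N)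
theorem vstar_spec (N : ℕ) : 3 ≤ vstar N ∧ N ≤ Tsum (vstar N) := Nat.find_spec (vstar_ex N)

theorem m0_min {N m : ℕ} (h3 : 3 ≤ m) (h : N ≤ SA m) : m0 N ≤ m :=
  Nat.find_min' (m0_ex N) ⟨h3, h⟩
theorem vstar_min {N v : ℕ} (h3 : 3 ≤ v) (h : N ≤ Tsum v) : vstar N ≤ v :=
  Nat.find_min' (vstar_ex N) ⟨h3, h⟩

-- characterisation used at A's exit: first m with SA m ≥ N
theorem m0_eq {N m : ℕ} (h3 : 3 ≤ m) (h : N ≤ SA m) (hprev : m = 3 ∨ SA (m-1) < N) :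
    m0 N = m := by
  have h1 := m0_min h3 h
  rcases hprev with h' | h'
  · have := (m0_spec N).1; omega
  · by_contra hne
    have h2 : m0 N ≤ m - 1 := by omega
    have := SA_mono h2
    have := (m0_spec N).2
    omega

theorem vstar_eq {N v : ℕ} (h3 : 3 ≤ v) (h : N ≤ Tsum v) (hprev : Tsum (v-1) < N) :
    vstar N = v := by
  have h1 := vstar_min h3 h
  by_contra hne
  have h2 : vstar N ≤ v - 1 := by omega
  have := Tsum_mono h2
  have := (vstar_spec N).2
  omega

theorem m0_le_46341 {N : ℕ} (h : N ≤ 2147483649) : m0 N ≤ 46341 := by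
  apply m0_min (by omega)
  have := SA_lb (m := 46341) (by omega)
  omega

-- the crux: A's block formula returns vstar
theorem exit_formula {N m : ℕ} (hN : 4 ≤ N) (hm3 : 3 ≤ m)
    (hSA : N ≤ SA m) (hprev : m = 3 ∨ SA (m-1) < N) :
    Tsum m = vstar N + (SA m - N) / m := by
  have hSAeq : SA m = Tsum (Tsum m) := SA_eq (by omega)
  have hM3 : 3 ≤ Tsum m := by
    have h1 : Tsum 3 ≤ Tsum m := Tsum_mono (by omega)
    have h2 : Tsum 3 = 5 := by decide
    omega
  have hvs := vstar_spec N
  -- v* lies in [Tsum(m-1), Tsum m]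
  have hvle : vstar N ≤ Tsum m := vstar_min hM3 (by omega)
  have hvlow : Tsum (m-1) ≤ vstar N := by
    rcases hprev with h' | h'
    · have e : Tsum (3-1) = 3 := by decide
      rw [h', e]; omega
    · have hTT : Tsum (Tsum (m-1)) < N := by
        have e : SA (m-1) = Tsum (Tsum (m-1)) := SA_eq (by omega)
        omega
      by_contra hlt
      have : Tsum (vstar N) ≤ Tsum (Tsum (m-1)) := Tsum_mono (by omega)
      omega
  have hTmsplit : Tsum m = Tsum (m-1) + G m := by
    have e : m = (m-1)+1 := by omega
    rw [e]; rfl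
  -- chain: Tsum v* + (Tsum m - v*)·m = Tsum (Tsum m)
  have hchain := Tsum_block_chain (m := m) (by omega) (Tsum m - vstar N) (by omega)
  have e1 : Tsum m - (Tsum m - vstar N) = vstar N := by omega
  rw [e1] at hchain
  -- remainder bounds: 0 ≤ Tsum v* - N < m
  have hGm1 : 1 ≤ G m := G_pos (by omega)
  have hGvle : G (vstar N) ≤ m := by
    have h1 : G (vstar N) ≤ G (Tsum m) := G_mono hvle
    have h2 : G (Tsum m) = m := G_val (by omega) (by omega) le_rfl
    omega
  have hTvsplit : Tsum (vstar N) = Tsum (vstar N - 1) + G (vstar N) := by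
    have e : vstar N = (vstar N - 1)+1 := by omega
    rw [e]; rfl
  have hprev' : Tsum (vstar N - 1) < N := by
    by_contra hge
    have h3' : 3 ≤ vstar N - 1 := by
      have h5 : Tsum 2 = 3 := by decide
      by_contra hlt
      have : Tsum (vstar N - 1) ≤ Tsum 2 := Tsum_mono (by omega)
      omega
    have := vstar_min (N := N) h3' (by omega)
    omega
  have hrem : Tsum (vstar N) - N < m := by omega
  -- division
  have e2 : SA m - N = m * (Tsum m - vstar N) + (Tsum (vstar N) - N) := by
    have := Nat.mul_comm m (Tsum m - vstar N)
    omega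
  have hdiv : (SA m - N) / m = Tsum m - vstar N := by
    rw [e2, Nat.mul_add_div (by omega : 0 < m), Nat.div_eq_of_lt hrem]
    omega
  omega
  -- END exit_formula

def Gpre (m : ℕ) : List Int := (List.range m).map (fun j => (G j : Int))

theorem Gpre_snoc (m : ℕ) : Gpre m ++ [((G m : ℕ) : Int)] = Gpre (m+1) := by
  simp [Gpre, List.range_succ]

theorem Gpre_extend (v : ℕ) : ∀ b a, (∀ i, a ≤ i → i < a + b → G i = v) →
    Gpre a ++ List.replicate b ((v : ℕ) : Int) = Gpre (a + b) := by
  intro b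
  induction b with
  | zero => intro a _; simp
  | succ b ih =>
    intro a hall
    have e : a + (b+1) = (a + b) + 1 := by omega
    rw [e, ← Gpre_snoc, ← ih a (fun i h1 h2 => hall i h1 (by omega)),
      hall (a+b) (by omega) (by omega), List.replicate_succ', ← List.append_assoc]

-- array bridge lemmas
theorem foldl_push (l : List Int) : ∀ a : Array Int, l.foldl Array.push a = (a.toList ++ l).toArray := by
  induction l with
  | nil => intro a; simp
  | cons x xs ih =>
    intro a
    rw [List.foldl_cons, ih]
    simp

theorem GpreA_size (m : ℕ) : (Gpre m).toArray.size = m := by simp [Gpre]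

theorem GpreA_get {j m : ℕ} (h : j < m) :
    pyListGet? (Gpre m).toArray ((j : ℕ) : Int) = some ((G j : ℕ) : Int) := by
  have hsize := GpreA_size m
  have hneg : ¬ ((j : ℕ) : Int) < 0 := by omega
  simp only [pyListGet?, hneg, ite_false]
  rw [dif_pos ⟨by omega, by rw [hsize]; omega⟩]
  congr 1
  simp [Gpre]

theorem GpreA_push (m : ℕ) :
    (Gpre m).toArray.push ((G m : ℕ) : Int) = (Gpre (m+1)).toArray := by
  rw [← Gpre_snoc]
  simp

-- B's loop: scans values v = 3,…  with the Golomb-recurrence table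
theorem loopB_run (N : ℕ) (_hN : 4 ≤ N) :
    ∀ d v, 3 ≤ v → Tsum (v-1) < N → N - v ≤ d →
    findLoopB (N : Int) (N + 1 - v) ((v : ℕ) : Int) ((Gpre (v+1)).toArray)
      ((Tsum (v-1) : ℕ) : Int) = some ((vstar N : ℕ) : Int) := by
  intro d
  induction d with
  | zero =>
    intro v h3 hT hd
    exfalso
    have := Tsum_lb (m := v-1) (by omega)
    omega
  | succ d ih =>
    intro v h3 hT hd
    have hTv : Tsum v = Tsum (v-1) + G v := by
      have e : v - 1 + 1 = v := by omega
      have h := Tsum_succ (v-1)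
      rw [e] at h
      exact h
    have hvN : v + 1 ≤ Tsum v := by have := Tsum_lb (m := v) (by omega); omega
    have hvltN : v < N := by have := Tsum_lb (m := v-1) (by omega); omega
    have ef : N + 1 - v = (N - v) + 1 := by omega
    rw [ef, findLoopB, GpreA_get (by omega : v < v+1)]
    simp only
    by_cases hc : N ≤ Tsum v
    · rw [if_pos (by omega)]
      have := vstar_eq (N := N) h3 hc hT
      simp [this]
    · rw [if_neg (by omega)]
      have hGv1 : 1 ≤ G v := G_pos (by omega)
      have hGvv : G v ≤ v := G_le v
      have hGGv : G (G v) ≤ G v := le_trans (G_le _) le_rfl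
      have hGG1 : 1 ≤ G (G v) := G_pos (by omega)
      rw [GpreA_get (by omega : G v < v+1)]
      simp only
      have eidx : ((v : ℕ) : Int) + 1 - ((G (G v) : ℕ) : Int) = ((v + 1 - G (G v) : ℕ) : Int) := by
        omega
      rw [eidx, GpreA_get (by omega : v + 1 - G (G v) < v+1)]
      simp only
      have erec : (1 : Int) + ((G (v + 1 - G (G v)) : ℕ) : Int) = ((G (v+1) : ℕ) : Int) := by
        have hr := G_rec (v-3)
        have e1 : v-3+4 = v+1 := by omega
        have e2 : v-3+3 = v := by omega
        rw [e1, e2] at hr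
        rw [hr]
        push_cast
        ring
      rw [erec, GpreA_push]
      have ecast : (((v : ℕ) : Int) + 1) = (((v+1 : ℕ)) : Int) := by omega
      have etot : ((Tsum (v-1) : ℕ) : Int) + ((G v : ℕ) : Int) = ((Tsum ((v+1)-1) : ℕ) : Int) := by
        simp only [Nat.add_sub_cancel]
        omega
      have hfin : N - (v+1) ≤ d := by omega
      have hT' : Tsum ((v+1)-1) < N := by simp only [Nat.add_sub_cancel]; omega
      have efuel : N - v = N + 1 - (v + 1) := by omega
      rw [ecast, etot, efuel]
      exact ih (v+1) (by omega) hT' hfin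

theorem exit_value {N m : ℕ} (hN : 4 ≤ N) (h3 : 3 ≤ m) (hSAm : N ≤ SA m)
    (hprev : m = 3 ∨ SA (m-1) < N) :
    ((Tsum (m-1) + 1 : ℕ) : Int) - 1 + ((G m : ℕ) : Int) - (((SA m - N) / m : ℕ) : Int)
      = ((vstar N : ℕ) : Int) := by
  have hform := exit_formula hN h3 hSAm hprev
  have e : m - 1 + 1 = m := by omega
  have hTm := Tsum_succ (m-1)
  rw [e] at hTm
  generalize (SA m - N) / m = q at hform
  omega

-- A's loop: per-run-length-class blocks with the capped decoded array
theorem loopA_run (N : ℕ) (hN : 4 ≤ N) (hD : N ≤ 2147483649) :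
    ∀ d m alen, 3 ≤ m → (m = 3 ∨ SA (m-1) < N) → m ≤ m0 N →
    (alen = Tsum (m-1) + 1 ∨ (100000 ≤ Tsum (m-1) + 1 ∧ 79996 ≤ alen ∧ alen ≤ Tsum (m-1) + 1)) →
    m0 N - m ≤ d →
    findLoopA (N : Int) (N + 1 - m) ((m : ℕ) : Int) ((Gpre alen).toArray)
      ((Tsum (m-1) + 1 : ℕ) : Int) ((SA (m-1) : ℕ) : Int) = some ((vstar N : ℕ) : Int) := by
  intro d
  induction d with
  | zero =>
    intro m alen h3 hprev hle hinv hd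
    have hm : m = m0 N := by omega
    have hSAm : N ≤ SA m := by rw [hm]; exact (m0_spec N).2
    have hm46 : m ≤ 46341 := by have := m0_le_46341 hD; omega
    have hTlb := Tsum_lb (m := m-1) (by omega)
    have hacc : m < alen := by rcases hinv with h | h <;> omega
    have hmN : m < N + 1 := by
      have : m0 N ≤ N := m0_min (by omega) (by have := SA_lb (m := N) (by omega); nlinarith)
      omega
    have ef : N + 1 - m = (N - m) + 1 := by omega
    rw [ef, findLoopA, GpreA_get hacc]
    simp only
    have hSAs : SA m = SA (m-1) + G m * m := by
      have e : m - 1 + 1 = m := by omega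
      have h := SA_succ (m := m-1) (by omega)
      rw [e] at h
      exact h
    have esum : ((SA (m-1) : ℕ) : Int) + ((G m : ℕ) : Int) * ((m : ℕ) : Int) = ((SA m : ℕ) : Int) := by
      rw [hSAs]; push_cast; ring
    rw [if_pos (by rw [esum]; exact_mod_cast hSAm)]
    have efd : PySem.Int.floordiv (((SA (m-1) : ℕ) : Int) + ((G m : ℕ) : Int) * ((m : ℕ) : Int) - ((N:ℕ) : Int)) ((m:ℕ) : Int)
        = (((SA m - N) / m : ℕ) : Int) := by
      rw [esum]
      have e1 : ((SA m : ℕ) : Int) - ((N : ℕ) : Int) = (((SA m - N : ℕ)) : Int) := by omega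
      rw [e1, PySem.Int.floordiv_natCast]
    rw [efd, exit_value hN h3 hSAm hprev]
  | succ d ih =>
    intro m alen h3 hprev hle hinv hd
    have hm46 : m ≤ 46341 := by have := m0_le_46341 hD; omega
    have hTlb := Tsum_lb (m := m-1) (by omega)
    have hacc : m < alen := by rcases hinv with h | h <;> omega
    have hmN : m < N + 1 := by
      have : m0 N ≤ N := m0_min (by omega) (by have := SA_lb (m := N) (by omega); nlinarith)
      omega
    have ef : N + 1 - m = (N - m) + 1 := by omega
    rw [ef, findLoopA, GpreA_get hacc]
    simp only
    have hSAs : SA m = SA (m-1) + G m * m := by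
      have e : m - 1 + 1 = m := by omega
      have h := SA_succ (m := m-1) (by omega)
      rw [e] at h
      exact h
    have esum : ((SA (m-1) : ℕ) : Int) + ((G m : ℕ) : Int) * ((m : ℕ) : Int) = ((SA m : ℕ) : Int) := by
      rw [hSAs]; push_cast; ring
    have hTm : Tsum m = Tsum (m-1) + G m := by
      have e : m - 1 + 1 = m := by omega
      have h := Tsum_succ (m-1)
      rw [e] at h
      exact h
    by_cases hc : N ≤ SA m
    · have hm : m = m0 N := (m0_eq h3 hc hprev).symm
      rw [if_pos (by rw [esum]; exact_mod_cast hc)]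
      have efd : PySem.Int.floordiv (((SA (m-1) : ℕ) : Int) + ((G m : ℕ) : Int) * ((m : ℕ) : Int) - ((N:ℕ) : Int)) ((m:ℕ) : Int)
          = (((SA m - N) / m : ℕ) : Int) := by
        rw [esum]
        have e1 : ((SA m : ℕ) : Int) - ((N : ℕ) : Int) = (((SA m - N : ℕ)) : Int) := by omega
        rw [e1, PySem.Int.floordiv_natCast]
      rw [efd, exit_value hN h3 hc hprev]
    · rw [if_neg (by rw [esum]; exact_mod_cast (by omega : ¬ ((N:ℕ):Int) ≤ ((SA m : ℕ) : Int)))]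
      have hnext : m + 1 ≤ m0 N := by
        by_contra hgt
        have h1 : m0 N ≤ m := by omega
        have := SA_mono h1
        have := (m0_spec N).2
        omega
      have elen : ((Tsum (m-1) + 1 : ℕ) : Int) + ((G m : ℕ) : Int) = ((Tsum m + 1 : ℕ) : Int) := by omega
      have etn : (((G m : ℕ) : Int)).toNat = G m := Int.toNat_natCast _
      rw [elen, etn]
      have hGub : G m ≤ 20004 := G_ub (by omega)
      have e1 : ((m : ℕ) : Int) + 1 = (((m+1 : ℕ)) : Int) := by omega
      have e2 : ((Tsum m + 1 : ℕ) : Int) = ((Tsum ((m+1)-1) + 1 : ℕ) : Int) := by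
        simp only [Nat.add_sub_cancel]
      have e3 : ((SA m : ℕ) : Int) = ((SA ((m+1)-1) : ℕ) : Int) := by
        simp only [Nat.add_sub_cancel]
      have efuel : N - m = N + 1 - (m + 1) := by omega
      by_cases hcap : Tsum m + 1 < 100000
      · rw [if_pos (by exact_mod_cast hcap)]
        have hext : (List.replicate (G m) ((m : ℕ) : Int)).foldl Array.push (Gpre alen).toArray
            = (Gpre (Tsum m + 1)).toArray := by
          rw [foldl_push, List.toList_toArray]
          have halen : alen = Tsum (m-1) + 1 := by rcases hinv with h | h <;> omega
          rw [halen]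
          have hx := Gpre_extend m (G m) (Tsum (m-1) + 1) ?_
          · rw [hx]
            congr 2
            omega
          · intro i h1 h2
            exact G_val (by omega) (by omega) (by omega)
        rw [hext, e1, esum, e2, e3, efuel]
        exact ih (m+1) (Tsum m + 1) (by omega) (by right; simp only [Nat.add_sub_cancel]; omega)
          hnext (by left; simp only [Nat.add_sub_cancel]) (by omega)
      · rw [if_neg (by exact_mod_cast hcap)]
        have halen2 : 100000 ≤ Tsum m + 1 := by omega
        have hinv' : alen ≤ Tsum m + 1 ∧ 79996 ≤ alen := by
          rcases hinv with h | h
          · constructor <;> omega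
          · constructor <;> omega
        rw [e1, esum, e2, e3, efuel]
        exact ih (m+1) alen (by omega) (by right; simp only [Nat.add_sub_cancel]; omega)
          hnext (by right; simp only [Nat.add_sub_cancel]; omega) (by omega)

-- top-level glue
theorem find_eq (n : Int) (hDom : Dom_find n) (_hPre : Pre_find n) : find n = find_alt n := by
  by_cases h : n ≤ 3
  · simp only [find, find_alt, if_pos h]
  · have hdom : -2147483648 ≤ n ∧ n ≤ 2147483648 := by
      have := hDom
      unfold Dom_find pvDomInt at this
      exact of_decide_eq_true this
    have hn : ((n.toNat : ℕ) : Int) = n := Int.toNat_of_nonneg (by omega)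
    have hN4 : 4 ≤ n.toNat := by omega
    have hND : n.toNat ≤ 2147483649 := by omega
    have hA := loopA_run n.toNat hN4 hND (m0 n.toNat) 3 4 (by omega) (Or.inl rfl)
      (m0_spec n.toNat).1 (by left; decide) (by omega)
    have hB := loopB_run n.toNat hN4 n.toNat 3 (by omega)
      (by have e : Tsum (3-1) = 3 := by decide
          omega) (by omega)
    have e3 : ((3 : ℕ) : Int) = (3 : Int) := rfl
    have eG4 : Gpre 4 = [0, 1, 2, 2] := by decide
    have eT : ((Tsum (3-1) + 1 : ℕ) : Int) = (4 : Int) := by decide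
    have eS : ((SA (3-1) : ℕ) : Int) = (5 : Int) := by decide
    have eT2 : ((Tsum (3-1) : ℕ) : Int) = (3 : Int) := by decide
    have eG4' : Gpre (3+1) = [0, 1, 2, 2] := by decide
    have efuelA : n.toNat + 1 - 3 = (n - 2).toNat := by omega
    rw [e3, eG4, eT, eS, hn, efuelA] at hA
    rw [e3, eG4', eT2, hn, efuelA] at hB
    simp only [find, find_alt, if_neg h]
    rw [hA, hB]

-- ===== VERDICT (by name: the statement is the Claim_ definition above) =====
theorem find_spec : Claim_equal_find := by
  intro n hDom hPre
  unfold Spec_find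
  exact find_eq n hDom hPre
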